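-- pv_equiv track=rewrite | github.com/chromeheartless/antidote.github.io | release/core/qrcode.py | finalize_bits
-- ===== SOURCE A (Python) =====
-- def finalize_bits(bits, length):
--     bits += "0000"  # terminator
--     while len(bits) % 8 != 0:
--         bits += "0"
--     pad_bytes = [0xec, 0x11]
--     i = 0
--     while len(bits)//8 < length:
--         bits += format(pad_bytes[i%2], "08b")
--         i += 1
--     return bits
-- ===== SOURCE B (Python) =====
-- def finalize_bits(bits, length):
--     bits += "0000"  # terminator
--     bits += "0" * (-len(bits) % 8)  # pad to byte boundary
--     n = length - len(bits) // 8
--     if n > 0: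
--         bits += ("1110110000010001" * ((n + 1) // 2))[:n * 8]
--     return bits
-- ===== Notes on version B (the rewrite author's own statement) =====
-- stated objective: simpler
-- what changed: Both while loops are replaced by arithmetic: the zero pad is computed as (-len)%8 in one append, and the 0xEC/0x11 pad is one sliced repetition of the 16-bit pattern instead of an alternating loop.
import Mathlib
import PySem

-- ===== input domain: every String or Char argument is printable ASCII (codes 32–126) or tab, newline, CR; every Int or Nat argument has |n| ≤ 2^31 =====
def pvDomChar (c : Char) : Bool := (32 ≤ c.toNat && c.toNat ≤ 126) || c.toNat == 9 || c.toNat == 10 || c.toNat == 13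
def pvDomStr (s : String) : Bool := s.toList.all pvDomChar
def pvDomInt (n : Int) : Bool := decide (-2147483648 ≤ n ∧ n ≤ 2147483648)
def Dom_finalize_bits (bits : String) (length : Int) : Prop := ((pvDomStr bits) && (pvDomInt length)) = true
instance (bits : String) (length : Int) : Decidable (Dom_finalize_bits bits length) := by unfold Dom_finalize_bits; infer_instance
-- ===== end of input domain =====

-- B replaces A's two while loops by arithmetic: one computed zero pad and one sliced
-- repetition of the 16-bit 0xEC/0x11 pattern (objective: simpler).

-- ===== PORT A =====

-- format(n, "08b") for 0 ≤ n < 256: 8 binary digits, MSB first (exact on that range;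
-- A only applies it to 0xec and 0x11)
def pvFormat08b (n : Int) : List Char :=
  (List.range 8).map (fun k => if PySem.Int.band n (2 ^ (7 - k)) ≠ 0 then '1' else '0')

-- `while len(bits) % 8 != 0: bits += "0"` — fuel-based recursion; fuel 8 bounds the
-- number of trips (at most 7), the while condition still decides every step
def pvLoopPadA : Nat → List Char → List Char
  | 0, l => l
  | fuel + 1, l => if l.length % 8 ≠ 0 then pvLoopPadA fuel (l ++ ['0']) else l

-- `while len(bits)//8 < length: bits += format(pad_bytes[i%2], "08b"); i += 1` —
-- fuel-based recursion; fuel length.toNat bounds the number of trips, the while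
-- condition still decides every step
def pvLoopFillA (length : Int) : Nat → List Char → Nat → List Char
  | 0, l, _ => l
  | fuel + 1, l, i =>
    if PySem.Int.floordiv (l.length : Int) 8 < length then
      pvLoopFillA length fuel (l ++ pvFormat08b (([0xec, 0x11] : List Int).getD (i % 2) 0)) (i + 1)
    else l

def finalize_bits (bits : String) (length : Int) : String :=
  String.ofList (pvLoopFillA length length.toNat (pvLoopPadA 8 (bits.toList ++ ['0', '0', '0', '0'])) 0)

-- ===== PORT B =====

def pvPat16 : List Char := "1110110000010001".toList

def finalize_bits_alt (bits : String) (length : Int) : String :=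
  let b1 := bits.toList ++ ['0', '0', '0', '0']
  let b2 := b1 ++ List.replicate ((PySem.Int.mod (-(b1.length : Int)) 8).toNat) '0'
  let n := length - PySem.Int.floordiv (b2.length : Int) 8
  if 0 < n then
    -- `(pat * ((n+1)//2))[:n*8]`: the slice upper bound n*8 is nonnegative here, so it is `take`
    String.ofList (b2 ++ (List.flatten (List.replicate (PySem.Int.floordiv (n + 1) 2).toNat pvPat16)).take (n * 8).toNat)
  else
    String.ofList b2

-- ===== PRECONDITION & SPEC =====
def Spec_finalize_bits (bits : String) (length : Int) (out : String) : Prop := out = finalize_bits_alt bits length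
instance (bits : String) (length : Int) (out : String) : Decidable (Spec_finalize_bits bits length out) := by unfold Spec_finalize_bits; infer_instance

-- ===== CLAIM (what is proved, stated in full; the proofs are below) =====
def Claim_equal_finalize_bits : Prop := ∀ (bits : String) (length : Int), Dom_finalize_bits bits length → Spec_finalize_bits bits length (finalize_bits bits length)

-- ===== LEMMAS AND PROOFS =====

def pvEc8 : List Char := "11101100".toList
def pvB11 : List Char := "00010001".toList

-- the characters A's fill loop appends after the state (·, i), as a function of the trip count
def pvPadTail : Nat → Nat → List Char
  | 0, _ => []
  | n + 1, i => (if i % 2 = 0 then pvEc8 else pvB11) ++ pvPadTail n (i + 1)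

theorem pvLoopPadA_eq (fuel : Nat) :
    ∀ l : List Char, (8 - l.length % 8) % 8 ≤ fuel →
      pvLoopPadA fuel l = l ++ List.replicate ((8 - l.length % 8) % 8) '0' := by
  induction fuel with
  | zero =>
    intro l hf
    have h0 : (8 - l.length % 8) % 8 = 0 := by omega
    simp [pvLoopPadA, h0]
  | succ f ih =>
    intro l hf
    by_cases h : l.length % 8 = 0
    · simp [pvLoopPadA, h]
    · rw [pvLoopPadA, if_pos (by omega)]
      rw [ih (l ++ ['0']) (by simp only [List.length_append, List.length_cons, List.length_nil]; omega)]
      have h1 : (8 - (l ++ ['0']).length % 8) % 8 + 1 = (8 - l.length % 8) % 8 := by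
        simp only [List.length_append, List.length_cons, List.length_nil]; omega
      rw [← h1, List.append_assoc, List.replicate_succ]
      rfl

theorem pvBlock_eq (i : Nat) :
    pvFormat08b (([0xec, 0x11] : List Int).getD (i % 2) 0)
      = (if i % 2 = 0 then pvEc8 else pvB11) := by
  rcases Nat.mod_two_eq_zero_or_one i with h | h <;> rw [h] <;> decide

theorem pvLoopFillA_eq (length : Int) (fuel : Nat) :
    ∀ (l : List Char) (i : Nat), (length - (l.length : Int) / 8).toNat ≤ fuel →
      pvLoopFillA length fuel l i = l ++ pvPadTail (length - (l.length : Int) / 8).toNat i := by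
  induction fuel with
  | zero =>
    intro l i hf
    have h0 : (length - (l.length : Int) / 8).toNat = 0 := by omega
    simp [pvLoopFillA, h0, pvPadTail]
  | succ f ih =>
    intro l i hf
    by_cases hcond : PySem.Int.floordiv ((l.length : Nat) : Int) 8 < length
    · rw [pvLoopFillA, if_pos hcond]
      rw [PySem.Int.floordiv_eq_ediv_of_pos (by norm_num)] at hcond
      have hlen : ((l ++ pvFormat08b (([0xec, 0x11] : List Int).getD (i % 2) 0)).length : Int)
          = (l.length : Int) + 8 := by
        simp [pvFormat08b]
      rw [ih _ (i + 1) (by rw [hlen]; omega), hlen]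
      have h2 : (length - (l.length : Int) / 8).toNat
          = (length - ((l.length : Int) + 8) / 8).toNat + 1 := by omega
      rw [h2, pvBlock_eq, pvPadTail, List.append_assoc]
    · rw [pvLoopFillA, if_neg hcond]
      rw [PySem.Int.floordiv_eq_ediv_of_pos (by norm_num)] at hcond
      have h0 : (length - (l.length : Int) / 8).toNat = 0 := by omega
      simp [h0, pvPadTail]

theorem pvPadTail_add_two (n : Nat) : ∀ i, pvPadTail n (i + 2) = pvPadTail n i := by
  induction n with
  | zero => intro i; rfl
  | succ n ih =>
    intro i
    simp only [pvPadTail, Nat.add_mod_right, ih (i + 1)]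

theorem pvTake_flatten (n : Nat) :
    (List.flatten (List.replicate ((n + 1) / 2) pvPat16)).take (n * 8) = pvPadTail n 0 := by
  induction n using Nat.twoStepInduction with
  | zero => decide
  | one => decide
  | more n ih _ =>
    have h2 : (n + 2 + 1) / 2 = (n + 1) / 2 + 1 := by omega
    rw [h2, List.replicate_succ, List.flatten_cons]
    have hlen : pvPat16.length = 16 := by rfl
    have h3 : (n + 2) * 8 = pvPat16.length + n * 8 := by rw [hlen]; ring
    rw [h3, List.take_length_add_append, ih]
    have hp : pvPat16 = pvEc8 ++ pvB11 := by rfl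
    rw [hp]
    simp only [pvPadTail, List.append_assoc]
    norm_num
    exact (pvPadTail_add_two n 0).symm

theorem finalize_bits_spec : Claim_equal_finalize_bits := by
  intro bits length _
  unfold Spec_finalize_bits
  simp only [finalize_bits, finalize_bits_alt]
  rw [pvLoopPadA_eq 8 _ (by omega)]
  rw [pvLoopFillA_eq length length.toNat _ 0 (by
    have h8 : (0:Int) ≤ ((((bits.toList ++ ['0', '0', '0', '0'] ++
        List.replicate ((8 - (bits.toList ++ ['0', '0', '0', '0']).length % 8) % 8) '0').length : Nat) : Int)) / 8 := by positivity
    omega)]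
  have hz : (PySem.Int.mod (-(((bits.toList ++ ['0', '0', '0', '0']).length : Nat) : Int)) 8).toNat
      = (8 - (bits.toList ++ ['0', '0', '0', '0']).length % 8) % 8 := by
    rw [PySem.Int.mod_eq_emod_of_pos (by norm_num)]; omega
  rw [hz]
  set b2 := (bits.toList ++ ['0', '0', '0', '0'])
      ++ List.replicate ((8 - (bits.toList ++ ['0', '0', '0', '0']).length % 8) % 8) '0'
  rw [PySem.Int.floordiv_eq_ediv_of_pos (b := 8) (by norm_num)]
  set n : Int := length - ((b2.length : Nat) : Int) / 8 with hn
  by_cases h : 0 < n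
  · rw [if_pos h]
    rw [PySem.Int.floordiv_eq_ediv_of_pos (by norm_num)]
    have e1 : (n * 8).toNat = n.toNat * 8 := by omega
    have e2 : ((n + 1) / 2).toNat = (n.toNat + 1) / 2 := by omega
    rw [e1, e2, pvTake_flatten]
  · rw [if_neg h]
    have : n.toNat = 0 := by omega
    rw [this]
    simp [pvPadTail]
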